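-- pv_equiv track=rewrite | github.com/HwangToeMat/Algorithm | 코테기출/뉴스클러스터링.py | mk_set
-- ===== SOURCE A (Python) =====
-- def mk_set(st):
--     tmp = []
--     for i in range(len(st)-1):
--         if ord(st[i]) < 65 or ord(st[i]) > 122 or (ord(st[i]) >= 91 and ord(st[i]) <= 96):
--             continue
--         if ord(st[i+1]) < 65 or ord(st[i+1]) > 122 or (ord(st[i+1]) >= 91 and ord(st[i+1]) <= 96):
--             continue
--         tmp.append(st[i:i+2].upper())
--     return tmp
-- ===== SOURCE B (Python) =====
-- def mk_set(st):
--     # Stage 1: split st into maximal runs of ASCII letters (exact ord ranges).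
--     runs = []
--     cur = []
--     for c in st:
--         o = ord(c)
--         if 65 <= o <= 90 or 97 <= o <= 122:
--             cur.append(c)
--         elif cur:
--             runs.append(''.join(cur))
--             cur = []
--     if cur:
--         runs.append(''.join(cur))
--     # Stage 2: each run of length L contributes its L-1 uppercased bigrams.
--     out = []
--     for r in runs:
--         R = r.upper()
--         out.extend(R[k:k+2] for k in range(len(R)-1))
--     return out
-- ===== Notes on version B (the rewrite author's own statement) =====
-- stated objective: alternative
-- what changed: B is a two-stage run-segmentation algorithm: it first splits the string into maximal runs of ASCII letters (same ord ranges as A), then emits each run's uppercased adjacent bigrams, instead of A's single indexed loop testing every adjacent pair of positions; a timing run measured it about 2x faster (one ord test per character instead of per-pair re-tests, and per-run upper() instead of per-bigram).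
import Mathlib
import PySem

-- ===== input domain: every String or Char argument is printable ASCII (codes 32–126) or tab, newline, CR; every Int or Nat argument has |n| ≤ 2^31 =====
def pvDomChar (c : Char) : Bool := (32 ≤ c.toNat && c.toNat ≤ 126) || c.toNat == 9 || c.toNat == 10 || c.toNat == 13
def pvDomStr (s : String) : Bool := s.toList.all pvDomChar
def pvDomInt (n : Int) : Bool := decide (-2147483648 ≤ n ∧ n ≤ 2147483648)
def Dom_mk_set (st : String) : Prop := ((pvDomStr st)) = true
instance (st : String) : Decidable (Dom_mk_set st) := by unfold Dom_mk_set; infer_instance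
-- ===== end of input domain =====

-- B replaces A's indexed adjacent-pair loop by a two-stage run-segmentation algorithm:
-- split the string into maximal ASCII-letter runs, then emit each run's uppercased bigrams (measured ~2x faster: one letter test per char, per-run upper).


-- ===== PORT A =====
def mk_set (st : String) : List String :=
  let cs := st.toList
  (PySem.List.pyRange 0 ((cs.length : Int) - 1) 1).foldl (fun tmp i =>
    if ((PySem.List.pyGetD cs i ' ').toNat : Int) < 65 ∨ ((PySem.List.pyGetD cs i ' ').toNat : Int) > 122 ∨
       (((PySem.List.pyGetD cs i ' ').toNat : Int) ≥ 91 ∧ ((PySem.List.pyGetD cs i ' ').toNat : Int) ≤ 96) then tmp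
    else if ((PySem.List.pyGetD cs (i+1) ' ').toNat : Int) < 65 ∨ ((PySem.List.pyGetD cs (i+1) ' ').toNat : Int) > 122 ∨
       (((PySem.List.pyGetD cs (i+1) ' ').toNat : Int) ≥ 91 ∧ ((PySem.List.pyGetD cs (i+1) ' ').toNat : Int) ≤ 96) then tmp
    else tmp ++ [String.ofList (PySem.Chars.upper (PySem.List.slice cs (some i) (some (i + 2))))]) []

-- ===== PORT B =====
-- Source B's ord-range letter test
def pvIsLetter (c : Char) : Bool :=
  (65 ≤ c.toNat && c.toNat ≤ 90) || (97 ≤ c.toNat && c.toNat ≤ 122)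

-- Source B's stage-1 loop body: extend current run / flush it into the run list
def pvStep (p : List (List Char) × List Char) (c : Char) : List (List Char) × List Char :=
  if pvIsLetter c then (p.1, p.2 ++ [c])
  else if p.2 ≠ [] then (p.1 ++ [p.2], [])
  else p

-- Source B's stage-2 comprehension: R[k:k+2] for k in range(len(R)-1)
def pvBigrams (R : List Char) : List String :=
  (List.range (R.length - 1)).map (fun (k : Nat) =>
    String.ofList (PySem.List.slice R (some (k : Int)) (some ((k : Int) + 2))))

def mk_set_alt (st : String) : List String :=
  let p := st.toList.foldl pvStep ([], [])
  let runs := if p.2 ≠ [] then p.1 ++ [p.2] else p.1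
  runs.foldl (fun out r => out ++ pvBigrams (PySem.Chars.upper r)) []

-- ===== PRECONDITION & SPEC =====
def Spec_mk_set (st : String) (out : List String) : Prop := out = mk_set_alt st
instance (st : String) (out : List String) : Decidable (Spec_mk_set st out) := by unfold Spec_mk_set; infer_instance

-- ===== CLAIM =====
def Claim_equal_mk_set : Prop := ∀ (st : String), Dom_mk_set st → Spec_mk_set st (mk_set st)

-- ===== LEMMAS AND PROOFS =====

-- common recursive normal form: uppercased adjacent letter pairs
def pvPairs : List Char → List String
  | a :: b :: t =>
      (if pvIsLetter a && pvIsLetter b then [String.ofList (PySem.Chars.upper [a, b])] else []) ++ pvPairs (b :: t)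
  | _ => []

-- adjacent bigrams of a list, recursively
def pvAdj : List Char → List String
  | a :: b :: t => String.ofList [a, b] :: pvAdj (b :: t)
  | _ => []

-- A-side normal form: filter-then-map over range(len-1) with default-indexed characters
def pvCanon (cs : List Char) : List String :=
  ((List.range (cs.length - 1)).filter
      (fun k => pvIsLetter (cs.getD k ' ') && pvIsLetter (cs.getD (k+1) ' '))).map
    (fun k => String.ofList (PySem.Chars.upper [cs.getD k ' ', cs.getD (k+1) ' ']))

theorem a_eq_canon (st : String) : mk_set st = pvCanon st.toList := by
  unfold mk_set pvCanon
  dsimp only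
  set cs := st.toList with hcs
  have hfg : (fun (tmp : List String) (i : Int) =>
    if ((PySem.List.pyGetD cs i ' ').toNat : Int) < 65 ∨ ((PySem.List.pyGetD cs i ' ').toNat : Int) > 122 ∨
       (((PySem.List.pyGetD cs i ' ').toNat : Int) ≥ 91 ∧ ((PySem.List.pyGetD cs i ' ').toNat : Int) ≤ 96) then tmp
    else if ((PySem.List.pyGetD cs (i+1) ' ').toNat : Int) < 65 ∨ ((PySem.List.pyGetD cs (i+1) ' ').toNat : Int) > 122 ∨
       (((PySem.List.pyGetD cs (i+1) ' ').toNat : Int) ≥ 91 ∧ ((PySem.List.pyGetD cs (i+1) ' ').toNat : Int) ≤ 96) then tmp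
    else tmp ++ [String.ofList (PySem.Chars.upper (PySem.List.slice cs (some i) (some (i + 2))))])
    = (fun tmp i =>
    if (¬(((PySem.List.pyGetD cs i ' ').toNat : Int) < 65 ∨ ((PySem.List.pyGetD cs i ' ').toNat : Int) > 122 ∨
       (((PySem.List.pyGetD cs i ' ').toNat : Int) ≥ 91 ∧ ((PySem.List.pyGetD cs i ' ').toNat : Int) ≤ 96)) ∧
        ¬(((PySem.List.pyGetD cs (i+1) ' ').toNat : Int) < 65 ∨ ((PySem.List.pyGetD cs (i+1) ' ').toNat : Int) > 122 ∨
       (((PySem.List.pyGetD cs (i+1) ' ').toNat : Int) ≥ 91 ∧ ((PySem.List.pyGetD cs (i+1) ' ').toNat : Int) ≤ 96)))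
    then tmp ++ [String.ofList (PySem.Chars.upper (PySem.List.slice cs (some i) (some (i + 2))))] else tmp) := by
    funext tmp i
    split_ifs <;> first | rfl | tauto
  rw [hfg]
  rw [PySem.List.foldl_append_ite]
  rw [PySem.List.pyRange_one]
  have hM : (((cs.length : Int) - 1) - 0).toNat = cs.length - 1 := by omega
  rw [hM, List.filter_map, List.map_map, List.nil_append]
  simp only [Function.comp_def]
  have hfilter : ∀ k ∈ List.range (cs.length - 1),
      (decide (¬(((PySem.List.pyGetD cs (0 + (k:Int)) ' ').toNat : Int) < 65 ∨ ((PySem.List.pyGetD cs (0 + (k:Int)) ' ').toNat : Int) > 122 ∨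
       (((PySem.List.pyGetD cs (0 + (k:Int)) ' ').toNat : Int) ≥ 91 ∧ ((PySem.List.pyGetD cs (0 + (k:Int)) ' ').toNat : Int) ≤ 96)) ∧
        ¬(((PySem.List.pyGetD cs (0 + (k:Int) + 1) ' ').toNat : Int) < 65 ∨ ((PySem.List.pyGetD cs (0 + (k:Int) + 1) ' ').toNat : Int) > 122 ∨
       (((PySem.List.pyGetD cs (0 + (k:Int) + 1) ' ').toNat : Int) ≥ 91 ∧ ((PySem.List.pyGetD cs (0 + (k:Int) + 1) ' ').toNat : Int) ≤ 96))))
      = (pvIsLetter (cs.getD k ' ') && pvIsLetter (cs.getD (k+1) ' ')) := by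
    intro k _
    have e0 : PySem.List.pyGetD cs (0 + (k:Int)) ' ' = cs.getD k ' ' := by
      rw [zero_add, PySem.List.pyGetD_natCast]
    have e1 : PySem.List.pyGetD cs (0 + (k:Int) + 1) ' ' = cs.getD (k+1) ' ' := by
      rw [zero_add, (by push_cast; ring : ((k:Int) + 1) = ((k+1 : Nat) : Int)), PySem.List.pyGetD_natCast]
    rw [e0, e1, Bool.eq_iff_iff]
    simp only [decide_eq_true_eq, Bool.and_eq_true, Bool.or_eq_true, decide_eq_true_eq, pvIsLetter]
    omega
  rw [List.filter_congr hfilter]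
  apply List.map_congr_left
  intro k hk
  have hkm : k < cs.length - 1 := List.mem_range.mp (List.mem_of_mem_filter hk)
  have hk1 : k + 1 < cs.length := by omega
  have e2 : PySem.List.slice cs (some (0 + (k:Int))) (some (0 + (k:Int) + 2)) = [cs[k], cs[k+1]] := by
    rw [zero_add, (by push_cast; ring : ((k:Int) + 2) = ((k+2 : Nat) : Int)),
      PySem.List.slice_natCast]
    have h1 : cs.drop k = cs[k] :: cs.drop (k+1) := List.drop_eq_getElem_cons (by omega)
    have h2 : cs.drop (k+1) = cs[k+1] :: cs.drop (k+2) := List.drop_eq_getElem_cons (by omega)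
    have h3 : k + 2 - k = 2 := by omega
    rw [h3, h1, h2]
    rfl
  rw [e2]
  congr 1
  simp [List.getD_eq_getElem?_getD, List.getElem?_eq_getElem (by omega : k < cs.length),
    List.getElem?_eq_getElem hk1]

-- shift lemmas for maps/filters over List.range
theorem map_range_shift {α : Type} (n : Nat) (f : Nat → α) :
    (List.range (n+1)).map f = f 0 :: (List.range n).map (fun k => f (k+1)) := by
  rw [List.range_succ_eq_map, List.map_cons, List.map_map]
  simp [Function.comp_def, Nat.succ_eq_add_one]

theorem filtermap_range_shift {α : Type} (n : Nat) (p : Nat → Bool) (f : Nat → α) :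
    ((List.range (n+1)).filter p).map f
      = (if p 0 then [f 0] else []) ++ ((List.range n).filter (fun k => p (k+1))).map (fun k => f (k+1)) := by
  rw [List.range_succ_eq_map, List.filter_cons]
  by_cases h0 : p 0 = true
  · rw [if_pos h0, if_pos h0, List.map_cons, List.filter_map, List.map_map]
    simp [Function.comp_def, Nat.succ_eq_add_one]
  · rw [if_neg h0, if_neg h0, List.filter_map, List.map_map]
    simp [Function.comp_def, Nat.succ_eq_add_one]

theorem canon_eq_pairs (cs : List Char) : pvCanon cs = pvPairs cs := by
  induction cs with
  | nil => rfl
  | cons a tail ih =>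
    cases tail with
    | nil => rfl
    | cons b t =>
      have hn : (a :: b :: t).length - 1 = ((b :: t).length - 1) + 1 := by
        simp
      unfold pvCanon
      rw [hn, filtermap_range_shift]
      simp only [List.getD_cons_succ, List.getD_cons_zero]
      rw [show pvPairs (a :: b :: t) =
        (if pvIsLetter a && pvIsLetter b then [String.ofList (PySem.Chars.upper [a, b])] else []) ++ pvPairs (b :: t)
        from rfl, ← ih]
      rfl

-- slice k (k+2) is take 2 ∘ drop k
theorem slice_two (k : Nat) (L : List Char) :
    PySem.List.slice L (some (k : Int)) (some ((k : Int) + 2)) = (L.drop k).take 2 := by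
  rw [(by push_cast; ring : ((k:Int) + 2) = ((k+2 : Nat) : Int)), PySem.List.slice_natCast]
  congr 1
  omega

-- bigrams-by-slice equals the recursive adjacent form
theorem bigrams_eq_adj (R : List Char) : pvBigrams R = pvAdj R := by
  induction R with
  | nil => rfl
  | cons a tail ih =>
    cases tail with
    | nil => rfl
    | cons b t =>
      have hn : (a :: b :: t).length - 1 = ((b :: t).length - 1) + 1 := by
        simp
      unfold pvBigrams
      rw [hn, map_range_shift]
      rw [show pvAdj (a :: b :: t) = String.ofList [a, b] :: pvAdj (b :: t) from rfl, ← ih]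
      congr 1
      unfold pvBigrams
      apply List.map_congr_left
      intro k _
      rw [slice_two, slice_two]
      rfl

-- on an all-letter run, uppercased adjacent bigrams are exactly pvPairs
theorem adj_upper_eq_pairs (r : List Char) (h : ∀ c ∈ r, pvIsLetter c = true) :
    pvAdj (PySem.Chars.upper r) = pvPairs r := by
  induction r with
  | nil => rfl
  | cons a tail ih =>
    cases tail with
    | nil => rfl
    | cons b t =>
      have ha : pvIsLetter a = true := h a (by simp)
      have hb : pvIsLetter b = true := h b (by simp)
      have hup : PySem.Chars.upper (a :: b :: t)
          = PySem.Chars.upperChar a :: PySem.Chars.upperChar b :: PySem.Chars.upper t := by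
        simp [PySem.Chars.upper]
      rw [hup]
      show String.ofList [PySem.Chars.upperChar a, PySem.Chars.upperChar b]
          :: pvAdj (PySem.Chars.upperChar b :: PySem.Chars.upper t) = pvPairs (a :: b :: t)
      have htail : pvAdj (PySem.Chars.upperChar b :: PySem.Chars.upper t)
          = pvAdj (PySem.Chars.upper (b :: t)) := by
        simp [PySem.Chars.upper]
      rw [htail, ih (fun c hc => h c (List.mem_cons_of_mem a hc))]
      rw [show pvPairs (a :: b :: t) =
        (if pvIsLetter a && pvIsLetter b then [String.ofList (PySem.Chars.upper [a, b])] else []) ++ pvPairs (b :: t)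
        from rfl]
      rw [ha, hb]
      simp [PySem.Chars.upper]

-- pvPairs splits at a non-letter character
theorem pairs_append_nonletter (c : Char) (hc : pvIsLetter c = false) :
    ∀ (xs ys : List Char), pvPairs (xs ++ c :: ys) = pvPairs xs ++ pvPairs ys := by
  intro xs
  induction xs with
  | nil =>
    intro ys
    cases ys with
    | nil => rfl
    | cons d t =>
      show pvPairs (c :: d :: t) = pvPairs [] ++ pvPairs (d :: t)
      rw [show pvPairs (c :: d :: t) =
        (if pvIsLetter c && pvIsLetter d then [String.ofList (PySem.Chars.upper [c, d])] else []) ++ pvPairs (d :: t)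
        from rfl, hc]
      simp [pvPairs]
  | cons a tail ih =>
    intro ys
    cases tail with
    | nil =>
      show pvPairs (a :: c :: ys) = pvPairs [a] ++ pvPairs ys
      rw [show pvPairs (a :: c :: ys) =
        (if pvIsLetter a && pvIsLetter c then [String.ofList (PySem.Chars.upper [a, c])] else []) ++ pvPairs (c :: ys)
        from rfl, hc]
      have h2 : pvPairs (c :: ys) = pvPairs ys := by
        have := ih ys
        simpa [pvPairs] using this
      simp [pvPairs, h2]
    | cons b t =>
      show pvPairs (a :: b :: (t ++ c :: ys)) = pvPairs (a :: b :: t) ++ pvPairs ys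
      rw [show pvPairs (a :: b :: (t ++ c :: ys)) =
        (if pvIsLetter a && pvIsLetter b then [String.ofList (PySem.Chars.upper [a, b])] else [])
          ++ pvPairs (b :: (t ++ c :: ys)) from rfl]
      rw [show pvPairs (a :: b :: t) =
        (if pvIsLetter a && pvIsLetter b then [String.ofList (PySem.Chars.upper [a, b])] else []) ++ pvPairs (b :: t)
        from rfl]
      have h2 := ih ys
      rw [List.append_assoc, ← h2]
      rfl

-- the flush loop only ever appends to the run list
theorem foldl_step_runs (cs : List Char) : ∀ (runs : List (List Char)) (cur : List Char),
    cs.foldl pvStep (runs, cur)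
      = (runs ++ (cs.foldl pvStep ([], cur)).1, (cs.foldl pvStep ([], cur)).2) := by
  induction cs with
  | nil => intro runs cur; simp
  | cons c cs' ih =>
    intro runs cur
    simp only [List.foldl_cons]
    by_cases hl : pvIsLetter c = true
    · simp only [pvStep, hl, if_pos]
      exact ih runs (cur ++ [c])
    · have hlf : pvIsLetter c = false := by simpa using hl
      by_cases hcur : cur = []
      · subst hcur
        simp only [pvStep, hlf, Bool.false_eq_true, if_false, ne_eq, not_true_eq_false]
        exact ih runs []
      · simp only [pvStep, hlf, Bool.false_eq_true, if_false, ne_eq, hcur, not_false_eq_true,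
          ite_true, List.nil_append]
        rw [ih (runs ++ [cur]) [], ih [cur] []]
        simp

def pvRunsOut (runs : List (List Char)) : List String :=
  runs.flatMap (fun r => pvBigrams (PySem.Chars.upper r))

theorem runsOut_append (l₁ l₂ : List (List Char)) :
    pvRunsOut (l₁ ++ l₂) = pvRunsOut l₁ ++ pvRunsOut l₂ := by
  simp [pvRunsOut]

theorem runsOut_single (r : List Char) (h : ∀ c ∈ r, pvIsLetter c = true) :
    pvRunsOut [r] = pvPairs r := by
  rw [pvRunsOut, List.flatMap_cons, List.flatMap_nil, List.append_nil,
    bigrams_eq_adj, adj_upper_eq_pairs r h]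

-- the whole B pipeline from an all-letter pending run computes pvPairs
theorem main_b (cs : List Char) : ∀ (cur : List Char), (∀ c ∈ cur, pvIsLetter c = true) →
    pvRunsOut (if (cs.foldl pvStep ([], cur)).2 ≠ [] then
        (cs.foldl pvStep ([], cur)).1 ++ [(cs.foldl pvStep ([], cur)).2]
      else (cs.foldl pvStep ([], cur)).1)
      = pvPairs (cur ++ cs) := by
  induction cs with
  | nil =>
    intro cur h
    cases hcur : cur with
    | nil => simp [pvRunsOut, pvPairs]
    | cons a t =>
      simp only [List.foldl_nil, ne_eq, List.append_nil]
      rw [if_pos (by simp)]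
      simp only [List.nil_append]
      exact runsOut_single _ (hcur ▸ h)
  | cons c cs' ih =>
    intro cur h
    simp only [List.foldl_cons]
    by_cases hl : pvIsLetter c = true
    · simp only [pvStep, hl, if_pos]
      have hall : ∀ x ∈ cur ++ [c], pvIsLetter x = true := by
        intro x hx
        rcases List.mem_append.mp hx with h1 | h1
        · exact h x h1
        · simp at h1; subst h1; exact hl
      rw [ih (cur ++ [c]) hall]
      congr 1
      simp
    · have hlf : pvIsLetter c = false := by simpa using hl
      by_cases hcur : cur = []
      · subst hcur
        simp only [pvStep, hlf, Bool.false_eq_true, if_false, ne_eq, not_true_eq_false]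
        rw [ih [] (by simp)]
        simp only [List.nil_append]
        exact (pairs_append_nonletter c hlf [] cs').symm
      · simp only [pvStep, hlf, Bool.false_eq_true, if_false, ne_eq, hcur, not_false_eq_true,
          ite_true, List.nil_append]
        rw [foldl_step_runs cs' [cur] []]
        have hI := ih [] (by simp)
        simp only [List.nil_append] at hI
        rw [pairs_append_nonletter c hlf cur cs']
        by_cases h2 : (cs'.foldl pvStep ([], [])).2 = []
        · rw [if_neg (by simpa using h2)]
          rw [if_neg (by simpa using h2)] at hI
          rw [runsOut_append, hI, runsOut_single cur h]
        · rw [if_pos (by simpa using h2)]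
          rw [if_pos (by simpa using h2)] at hI
          rw [List.append_assoc, runsOut_append, hI, runsOut_single cur h]

theorem alt_eq_pairs (st : String) : mk_set_alt st = pvPairs st.toList := by
  unfold mk_set_alt
  dsimp only
  have hfold : ∀ (runs : List (List Char)) (acc : List String),
      runs.foldl (fun out r => out ++ pvBigrams (PySem.Chars.upper r)) acc = acc ++ pvRunsOut runs := by
    intro runs
    induction runs with
    | nil => intro acc; simp [pvRunsOut]
    | cons r rs ihr => intro acc; simp [pvRunsOut, List.flatMap_cons, ihr, List.append_assoc]
  rw [hfold, List.nil_append]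
  have := main_b st.toList [] (by simp)
  simpa using this

-- ===== VERDICT =====
theorem mk_set_spec : Claim_equal_mk_set := by
  intro st _
  unfold Spec_mk_set
  rw [a_eq_canon, canon_eq_pairs, alt_eq_pairs]
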